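-- pv_equiv track=rewrite | github.com/liugang926/AD-Org-Sync | sync_app/web/routes_lifecycle.py | _normalize_id_list
-- ===== SOURCE A (Python) =====
-- def _normalize_id_list(values: list[int] | None) -> list[int]:
--     normalized_ids: list[int] = []
--     seen: set[int] = set()
--     for value in list(values or []):
--         try:
--             candidate = int(value)
--         except (TypeError, ValueError):
--             continue
--         if candidate <= 0 or candidate in seen:
--             continue
--         seen.add(candidate)
--         normalized_ids.append(candidate)
--     return normalized_ids
-- ===== SOURCE B (Python) =====
-- def _normalize_id_list(values: list[int] | None) -> list[int]:
--     def to_int(value):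
--         try:
--             return int(value)
--         except (TypeError, ValueError):
--             return None
--
--     cs = [to_int(v) for v in (values or [])]
--     # walk backwards so that the surviving entry for each value is its FIRST index
--     first = {}
--     for i, c in reversed(list(enumerate(cs))):
--         first[c] = i
--     return [c for i, c in enumerate(cs)
--             if c is not None and c > 0 and first[c] == i]
-- ===== Notes on version B (the rewrite author's own statement) =====
-- stated objective: alternative
-- what changed: B keeps no seen-set and emits nothing while scanning: it converts all values first, builds a first-occurrence index map by traversing the enumerated list in reverse (dict overwrite, no membership test), then keeps each element that is a positive int and sits at its own first index.
import Mathlib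
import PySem

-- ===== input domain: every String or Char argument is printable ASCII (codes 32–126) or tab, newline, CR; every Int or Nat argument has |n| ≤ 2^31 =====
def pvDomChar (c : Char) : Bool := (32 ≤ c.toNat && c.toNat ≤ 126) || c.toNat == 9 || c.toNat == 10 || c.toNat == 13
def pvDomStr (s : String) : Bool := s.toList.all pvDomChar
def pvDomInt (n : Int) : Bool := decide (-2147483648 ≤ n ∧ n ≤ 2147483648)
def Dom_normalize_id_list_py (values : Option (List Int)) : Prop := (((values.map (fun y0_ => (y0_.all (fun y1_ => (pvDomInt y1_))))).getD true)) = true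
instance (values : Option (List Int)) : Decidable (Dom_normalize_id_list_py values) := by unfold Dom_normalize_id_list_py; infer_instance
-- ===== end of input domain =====

-- B: no seen-set — convert pass, reverse-built first-index map, then keep each positive exactly at its first index; alternative algorithm, not claimed faster.


-- ===== PORT A =====
def pvStepA (st : PySem.Set Int × List Int) (value : Int) : PySem.Set Int × List Int :=
  -- try: candidate = int(value) — never raises on an int
  let candidate := value
  -- if candidate <= 0 or candidate in seen: continue; seen.add(candidate); normalized_ids.append(candidate)
  if decide (candidate ≤ 0) || st.1.contains candidate then st
  else (st.1.add candidate, st.2 ++ [candidate])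

def normalize_id_list_py (values : Option (List Int)) : List Int :=
  ((values.getD []).foldl pvStepA (PySem.Set.empty, [])).2

-- ===== PORT B =====
-- to_int: int(value) on an int never raises, so the try/except helper returns some value
def pvToInt (value : Int) : Option Int := some value

-- first[c] = i for (i, c) over reversed(list(enumerate(cs))): surviving entry is the first index
def pvFirstMap (cs : List (Option Int)) : PySem.Dict (Option Int) Int :=
  ((PySem.List.enumerate cs 0).reverse).foldl (fun d p => d.insert p.2 p.1) PySem.Dict.empty

-- body of the final comprehension: keep c when it is an int, positive, and at its first index
def pvKeep (first : PySem.Dict (Option Int) Int) (i : Int) (copt : Option Int) : Option Int :=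
  match copt with
  | some c => if decide (0 < c) && (first.get? (some c) == some i) then some c else none
  | none => none

def normalize_id_list_py_alt (values : Option (List Int)) : List Int :=
  let cs := (values.getD []).map pvToInt
  (PySem.List.enumerate cs 0).filterMap (fun ic => pvKeep (pvFirstMap cs) ic.1 ic.2)

-- ===== PRECONDITION & SPEC =====
def Spec_normalize_id_list_py (values : Option (List Int)) (out : List Int) : Prop := out = normalize_id_list_py_alt values
instance (values : Option (List Int)) (out : List Int) : Decidable (Spec_normalize_id_list_py values out) := by unfold Spec_normalize_id_list_py; infer_instance

-- ===== CLAIM (what is proved, stated in full; the proofs are below) =====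
def Claim_equal_normalize_id_list_py : Prop := ∀ (values : Option (List Int)), Dom_normalize_id_list_py values → Spec_normalize_id_list_py values (normalize_id_list_py values)

-- ===== LEMMAS AND PROOFS =====
-- common reference: first-occurrence-deduped positives of l, the прefix p being the already-processed elements
def pvG (p l : List Int) : List Int :=
  match l with
  | [] => []
  | c :: rest => if 0 < c ∧ c ∉ p then c :: pvG (p ++ [c]) rest else pvG (p ++ [c]) rest

-- A's loop from any state whose seen-set agrees (on positives) with membership in the processed prefix p
theorem pvLoopA_eq (l : List Int) : ∀ (s : PySem.Set Int) (out p : List Int),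
    (∀ c : Int, 0 < c → (c ∈ s ↔ c ∈ p)) →
    (l.foldl pvStepA (s, out)).2 = out ++ pvG p l := by
  induction l with
  | nil => intro s out p _; simp [pvG]
  | cons c rest ih =>
    intro s out p h
    rw [List.foldl_cons]
    by_cases hc : 0 < c
    · by_cases hmem : c ∈ p
      · have hcs : c ∈ s := (h c hc).2 hmem
        rw [show pvStepA (s, out) c = (s, out) by simp [pvStepA]; exact fun _ => hcs]
        rw [pvG, if_neg (by tauto)]
        refine ih s out (p ++ [c]) (fun d hd => ?_)
        have hiff := h d hd
        simp only [List.mem_append, List.mem_singleton]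
        constructor
        · intro h1; exact Or.inl (hiff.1 h1)
        · rintro (h1 | rfl)
          · exact hiff.2 h1
          · exact hcs
      · have hns : c ∉ s := fun hx => hmem ((h c hc).1 hx)
        rw [show pvStepA (s, out) c = (PySem.Set.add s c, out ++ [c]) by
          simp [pvStepA, show ¬ c ≤ 0 by omega]; exact hns]
        rw [pvG, if_pos ⟨hc, hmem⟩]
        rw [ih (PySem.Set.add s c) (out ++ [c]) (p ++ [c]) (fun d hd => by
          have hiff := h d hd
          simp only [pysem, List.mem_append, List.mem_singleton]
          tauto), List.append_assoc]
        rfl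
    · rw [show pvStepA (s, out) c = (s, out) by simp [pvStepA, show c ≤ 0 by omega]]
      rw [pvG, if_neg (by tauto)]
      refine ih s out (p ++ [c]) (fun d hd => ?_)
      have hiff := h d hd
      have hdc : d ≠ c := by omega
      simp only [List.mem_append, List.mem_singleton]
      tauto

-- first index of k in a list, if any (what pvFirstMap's reverse-overwrite loop computes)
def pvFirst (k : Option Int) : List (Option Int) → Option Nat
  | [] => none
  | c :: cs => if c = k then some 0 else (pvFirst k cs).map (· + 1)

theorem pvFirstMap_get? (cs : List (Option Int)) : ∀ (st : Int) (k : Option Int),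
    (((PySem.List.enumerate cs st).reverse).foldl (fun d p => d.insert p.2 p.1) PySem.Dict.empty).get? k
      = (pvFirst k cs).map (fun j => st + (j : Int)) := by
  induction cs with
  | nil => intro st k; simp [PySem.List.enumerate, pvFirst]
  | cons c cs ih =>
    intro st k
    rw [PySem.List.enumerate_cons, List.reverse_cons, List.foldl_append, List.foldl_cons,
        List.foldl_nil, PySem.Dict.get?_insert, pvFirst]
    by_cases hck : c = k
    · simp [hck]
    · rw [if_neg (fun h => hck h.symm), if_neg hck, ih (st + 1) k]
      cases pvFirst k cs with
      | none => simp
      | some j => simp; ring_nf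

theorem pvFirst_append (p : List (Option Int)) : ∀ (X : List (Option Int)) (k : Option Int),
    pvFirst k (p ++ X) = if k ∈ p then pvFirst k p else (pvFirst k X).map (· + p.length) := by
  induction p with
  | nil => intro X k; cases h : pvFirst k X <;> simp [h]
  | cons a p ih =>
    intro X k
    by_cases hak : a = k
    · simp [pvFirst, hak]
    · have hka : k ≠ a := fun h => hak h.symm
      rw [List.cons_append, pvFirst, if_neg hak, ih X k, pvFirst, if_neg hak]
      by_cases hkp : k ∈ p
      · simp [hkp, hka]
      · rw [if_neg hkp, if_neg (by simp [hkp, hka])]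
        cases pvFirst k X with
        | none => simp
        | some j => simp; omega

theorem pvFirst_lt (k : Option Int) : ∀ (p : List (Option Int)), k ∈ p →
    ∃ j, pvFirst k p = some j ∧ j < p.length := by
  intro p hp
  induction p with
  | nil => cases hp
  | cons a p ih =>
    by_cases hak : a = k
    · exact ⟨0, by simp [pvFirst, hak]⟩
    · have hkp : k ∈ p := by
        rcases List.mem_cons.mp hp with h | h
        · exact absurd h.symm hak
        · exact h
      obtain ⟨j, hj, hlt⟩ := ih hkp
      exact ⟨j + 1, by simp [pvFirst, hak, hj], by simp; omega⟩

-- the first-index test at position p.length of t = p ++ c :: rest decides c ∉ p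
theorem pvKeep_head (p rest : List Int) (c : Int) :
    ((pvFirstMap ((p ++ c :: rest).map pvToInt)).get? (some c) == some ((p.length : Nat) : Int))
      = decide (c ∉ p) := by
  rw [pvFirstMap, pvFirstMap_get? _ 0 (some c)]
  have hmap : (p ++ c :: rest).map pvToInt = p.map pvToInt ++ (some c :: rest.map pvToInt) := by
    simp [pvToInt]
  rw [hmap, pvFirst_append]
  by_cases hcp : c ∈ p
  · have hmem : (some c) ∈ p.map pvToInt := by simp [pvToInt, hcp]
    obtain ⟨j, hj, hlt⟩ := pvFirst_lt (some c) (p.map pvToInt) hmem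
    simp only [List.length_map] at hlt
    rw [if_pos hmem, hj]
    simp [hcp]
    omega
  · have hmem : (some c) ∉ p.map pvToInt := by simp [pvToInt, hcp]
    rw [if_neg hmem]
    simp [pvFirst, hcp]

-- B's comprehension, processing the tail l of the full list t = p ++ l, equals the same reference function
theorem pvLoopB_eq (l : List Int) : ∀ (p t : List Int), t = p ++ l →
    (PySem.List.enumerate (l.map pvToInt) ((p.length : Nat) : Int)).filterMap (fun ic => pvKeep (pvFirstMap (t.map pvToInt)) ic.1 ic.2) = pvG p l := by
  induction l with
  | nil => intro p t _; simp [pvG]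
  | cons c rest ih =>
    intro p t ht
    rw [List.map_cons, PySem.List.enumerate_cons]
    have hkeep : pvKeep (pvFirstMap (t.map pvToInt)) ((p.length : Nat) : Int) (pvToInt c)
        = if 0 < c ∧ c ∉ p then some c else none := by
      rw [pvToInt]
      show (if (decide (0 < c) && ((pvFirstMap (t.map pvToInt)).get? (some c) == some ((p.length : Nat) : Int))) = true then some c else none)
        = if 0 < c ∧ c ∉ p then some c else none
      rw [ht, pvKeep_head p rest c]
      by_cases h1 : 0 < c <;> by_cases h2 : c ∈ p <;> simp [h1, h2]
    have hstep : ((p.length : Nat) : Int) + 1 = (((p ++ [c]).length : Nat) : Int) := by simp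
    simp only [List.filterMap_cons]
    rw [hkeep]
    by_cases hcp : 0 < c ∧ c ∉ p
    · rw [if_pos hcp, pvG, if_pos hcp, hstep, ih (p ++ [c]) t (by simp [ht])]
    · rw [if_neg hcp, pvG, if_neg hcp, hstep, ih (p ++ [c]) t (by simp [ht])]

-- ===== VERDICT (by name: the statement is the Claim_ definition above) =====
theorem normalize_id_list_py_spec : Claim_equal_normalize_id_list_py := by
  intro values _
  unfold Spec_normalize_id_list_py normalize_id_list_py normalize_id_list_py_alt
  rw [pvLoopA_eq (values.getD []) PySem.Set.empty [] [] (by intro c _; simp [PySem.Set.empty])]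
  have := pvLoopB_eq (values.getD []) [] (values.getD []) (by simp)
  simpa using this.symm
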